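-- pv_equiv track=rewrite | github.com/PeytonAndras/ais_project | hackrf_cli_transmit.py | nrz_to_nrzi
-- ===== SOURCE A (Python) =====
-- def nrz_to_nrzi(stuffed_data_bits):
--     nrzi_levels = []
--     current_level = 1 # Assume line is high before this data block (after start flag)
--     for bit in stuffed_data_bits:
--         if bit == 1: # Data '1' means no transition
--             nrzi_levels.append(current_level)
--         else: # Data '0' means transition
--             current_level = 1 - current_level
--             nrzi_levels.append(current_level)
--     return nrzi_levels
-- ===== SOURCE B (Python) =====
-- def nrz_to_nrzi(stuffed_data_bits):
--     # Segment decomposition: first collect the positions of transition bits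
--     # (bit != 1), then emit constant runs between them; the run level is read
--     # off the parity of the number of transitions so far (no mutable toggle).
--     n = len(stuffed_data_bits)
--     trans = [i for i, b in enumerate(stuffed_data_bits) if b != 1]
--     out = []
--     prev = 0
--     for k, t in enumerate(trans + [n]):
--         out.extend([(k + 1) % 2] * (t - prev))
--         if t < n:
--             out.append(k % 2)
--         prev = t + 1
--     return out
-- ===== Notes on version B (the rewrite author's own statement) =====
-- stated objective: alternative
-- what changed: Replaces A's single pass with a mutable toggled level by a staged segment decomposition: a first pass collects the positions of transition bits (bit != 1), a second pass emits constant runs between consecutive transition positions with the run level computed from the parity of the transition count, so no toggled level state is maintained.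
import Mathlib
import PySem

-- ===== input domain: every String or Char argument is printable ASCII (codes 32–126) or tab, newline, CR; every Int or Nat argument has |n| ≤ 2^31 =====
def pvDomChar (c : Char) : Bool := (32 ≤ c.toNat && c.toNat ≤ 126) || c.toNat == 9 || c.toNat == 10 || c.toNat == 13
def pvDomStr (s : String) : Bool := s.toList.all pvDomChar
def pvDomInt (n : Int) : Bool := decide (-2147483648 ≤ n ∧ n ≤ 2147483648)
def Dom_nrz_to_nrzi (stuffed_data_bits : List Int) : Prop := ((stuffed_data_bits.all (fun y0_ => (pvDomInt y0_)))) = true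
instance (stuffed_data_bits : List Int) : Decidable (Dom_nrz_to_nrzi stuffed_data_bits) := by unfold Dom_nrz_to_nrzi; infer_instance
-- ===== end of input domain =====

-- B replaces A's single-pass mutable level toggle with a staged segment decomposition: collect transition positions first, then emit constant runs whose level is the transition-count parity (alternative decomposition, same cost).


-- ===== PORT A =====
-- A's loop body: append the current level on bit == 1, else toggle the level and append it
def nrzA_step (st : List Int × Int) (bit : Int) : List Int × Int :=
  if bit == 1 then (st.1 ++ [st.2], st.2)
  else (st.1 ++ [1 - st.2], 1 - st.2)

def nrz_to_nrzi (stuffed_data_bits : List Int) : List Int :=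
  (stuffed_data_bits.foldl nrzA_step ([], 1)).1

-- ===== PORT B =====
-- Source B's `trans` comprehension: positions of the bits that are not 1
-- (`s` is enumerate's start; Source B calls it with the default 0)
def nrzB_trans (s : Nat) (xs : List Int) : List Nat :=
  (xs.zipIdx s).filterMap (fun p => if p.1 ≠ 1 then some p.2 else none)

-- Source B's loop body over `enumerate(trans + [n])`: extend by a constant run, then
-- (if not at the final bound) append the post-transition level; state = (out, prev).
-- zipIdx pairs (t, k) where Python's enumerate yields (k, t).
def nrzB_step (n : Nat) (st : List Int × Nat) (tk : Nat × Nat) : List Int × Nat :=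
  let out := st.1 ++ List.replicate (tk.1 - st.2) ((((tk.2 + 1) % 2 : Nat) : Int))
  if tk.1 < n then (out ++ [((tk.2 % 2 : Nat) : Int)], tk.1 + 1)
  else (out, tk.1 + 1)

def nrz_to_nrzi_alt (stuffed_data_bits : List Int) : List Int :=
  let n := stuffed_data_bits.length
  (((nrzB_trans 0 stuffed_data_bits ++ [n]).zipIdx 0).foldl (nrzB_step n) ([], 0)).1

-- ===== PRECONDITION & SPEC =====
def Spec_nrz_to_nrzi (stuffed_data_bits : List Int) (out : List Int) : Prop := out = nrz_to_nrzi_alt stuffed_data_bits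
instance (stuffed_data_bits : List Int) (out : List Int) : Decidable (Spec_nrz_to_nrzi stuffed_data_bits out) := by unfold Spec_nrz_to_nrzi; infer_instance

-- ===== CLAIM (what is proved, stated in full; the proofs are below) =====
def Claim_equal_nrz_to_nrzi : Prop := ∀ (stuffed_data_bits : List Int), Dom_nrz_to_nrzi stuffed_data_bits → Spec_nrz_to_nrzi stuffed_data_bits (nrz_to_nrzi stuffed_data_bits)

-- ===== LEMMAS AND PROOFS =====
-- Reference recurrence: the NRZI stream from current level `lvl` (A's recurrence verbatim).
def nrzSpec (lvl : Int) : List Int → List Int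
  | [] => []
  | b :: xs => if b == 1 then lvl :: nrzSpec lvl xs
               else (1 - lvl) :: nrzSpec (1 - lvl) xs

-- level emitted for the k-th segment (k transitions seen so far)
def lvlB (k : Nat) : Int := (((k + 1) % 2 : Nat) : Int)

theorem lvlB_succ (k : Nat) : lvlB (k + 1) = 1 - lvlB k := by
  unfold lvlB; omega

theorem nrzA_fold (xs : List Int) : ∀ (acc : List Int) (lvl : Int),
    (xs.foldl nrzA_step (acc, lvl)).1 = acc ++ nrzSpec lvl xs := by
  induction xs with
  | nil => intro acc lvl; simp [nrzSpec]
  | cons b xs ih =>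
    intro acc lvl
    by_cases hb : b = 1
    · simp [nrzA_step, nrzSpec, hb, ih]
    · simp [nrzA_step, nrzSpec, hb, ih]

theorem nrzB_trans_cons (s : Nat) (b : Int) (xs : List Int) :
    nrzB_trans s (b :: xs) =
      (if b ≠ 1 then [s] else []) ++ nrzB_trans (s + 1) xs := by
  by_cases hb : b = 1 <;> simp [nrzB_trans, List.zipIdx_cons, hb]

-- Main invariant of B's fold: processing the bounds of the suffix `ys` (whose first
-- absolute position is `s`) from state (acc, p), p ≤ s, with k transitions already
-- seen, appends the untouched run p..s-1 and then the NRZI stream of ys.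
theorem nrzB_fold (n : Nat) : ∀ (ys : List Int) (s p k : Nat) (acc : List Int),
    p ≤ s → n = s + ys.length →
    (((nrzB_trans s ys ++ [n]).zipIdx k).foldl (nrzB_step n) (acc, p)).1
      = acc ++ List.replicate (s - p) (lvlB k) ++ nrzSpec (lvlB k) ys := by
  intro ys
  induction ys with
  | nil =>
    intro s p k acc hp hn
    subst hn
    simp [nrzB_trans, nrzB_step, nrzSpec, lvlB, List.zipIdx_cons]
  | cons b xs ih =>
    intro s p k acc hp hn
    rw [nrzB_trans_cons]
    by_cases hb : b = 1
    · subst hb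
      simp only [ne_eq, not_true_eq_false, if_false, List.nil_append]
      rw [ih (s + 1) p k acc (by omega) (by simp at hn ⊢; omega), nrzSpec]
      simp only [beq_self_eq_true, if_true]
      rw [show s + 1 - p = (s - p) + 1 by omega, List.replicate_succ']
      simp
    · simp only [ne_eq, hb, not_false_eq_true, if_true, List.cons_append,
        List.zipIdx_cons, List.foldl_cons, List.nil_append]
      have hs : s < n := by simp at hn; omega
      have hk : ((k % 2 : Nat) : Int) = lvlB (k + 1) := by unfold lvlB; omega
      have hl : (((k + 1) % 2 : Nat) : Int) = lvlB k := rfl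
      have hstep : nrzB_step n (acc, p) (s, k)
          = (acc ++ List.replicate (s - p) (lvlB k) ++ [lvlB (k + 1)], s + 1) := by
        simp only [nrzB_step, hs, if_true, hk, hl, List.append_assoc]
      rw [hstep,
        ih (s + 1) (s + 1) (k + 1) _ (le_refl _) (by simp at hn ⊢; omega), nrzSpec]
      simp [hb, lvlB_succ]

-- ===== VERDICT (by name: the statement is the Claim_ definition above) =====
theorem nrz_to_nrzi_spec : Claim_equal_nrz_to_nrzi := by
  intro xs _
  show nrz_to_nrzi xs = nrz_to_nrzi_alt xs
  have hA := nrzA_fold xs [] 1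
  have hB := nrzB_fold xs.length xs 0 0 0 [] (le_refl 0) (by simp)
  have hl : lvlB 0 = 1 := rfl
  rw [hl] at hB
  simp only [nrz_to_nrzi, nrz_to_nrzi_alt]
  rw [hA, hB]
  simp
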